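-- pv_equiv track=rewrite | github.com/samw212/yolo_distillation | src/pipeline/stages/auto_labeling.py | _match_label_to_class
-- ===== SOURCE A (Python) =====
-- def _match_label_to_class(label: str, classes: list[str], class_prompts: dict[str, str]) -> int | None:
--     """Match a Grounding DINO output label to a pipeline class index.
--
--     Args:
--         label: The label string from Grounding DINO.
--         classes: List of target class names.
--         class_prompts: Mapping of class names to their prompt strings.
--
--     Returns:
--         Class index or None if no match found.
--     """
--     label_lower = label.lower().strip()
--
--     # Direct match
--     for i, cls_name in enumerate(classes):
--         if label_lower == cls_name.lower():
--             return i
--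
--     # Check if label appears in any class prompt
--     for i, cls_name in enumerate(classes):
--         prompt = class_prompts.get(cls_name, cls_name)
--         prompt_parts = [p.strip().lower() for p in prompt.split(".")]
--         if label_lower in prompt_parts:
--             return i
--
--     # Substring match (label is part of class name or vice versa)
--     for i, cls_name in enumerate(classes):
--         if label_lower in cls_name.lower() or cls_name.lower() in label_lower:
--             return i
--
--     return None
-- ===== SOURCE B (Python) =====
-- def _match_label_to_class(label: str, classes: list[str], class_prompts: dict[str, str]) -> int | None:
--     """Single pass: return the first exact (lowercased) match outright; otherwise rank each
--     class by tier (2 = prompt part, 3 = substring) and keep the earliest class at the lowest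
--     tier, skipping tier checks the current best already beats."""
--     label_lower = label.lower().strip()
--     best_tier = 4
--     best_idx = None
--     for i, cls_name in enumerate(classes):
--         cls_lower = cls_name.lower()
--         if label_lower == cls_lower:
--             return i
--         if best_tier > 2:
--             parts = [p.strip().lower() for p in class_prompts.get(cls_name, cls_name).split(".")]
--             if label_lower in parts:
--                 best_tier, best_idx = 2, i
--                 continue
--             if best_tier > 3 and (label_lower in cls_lower or cls_lower in label_lower):
--                 best_tier, best_idx = 3, i
--     return best_idx
-- ===== Notes on version B (the rewrite author's own statement) =====
-- stated objective: alternative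
-- what changed: Replaces A's three sequential full scans (exact, prompt-part, substring) by one pass over enumerate(classes) that assigns each class its best tier and keeps the earliest class at the strictly lowest tier.
import Mathlib
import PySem

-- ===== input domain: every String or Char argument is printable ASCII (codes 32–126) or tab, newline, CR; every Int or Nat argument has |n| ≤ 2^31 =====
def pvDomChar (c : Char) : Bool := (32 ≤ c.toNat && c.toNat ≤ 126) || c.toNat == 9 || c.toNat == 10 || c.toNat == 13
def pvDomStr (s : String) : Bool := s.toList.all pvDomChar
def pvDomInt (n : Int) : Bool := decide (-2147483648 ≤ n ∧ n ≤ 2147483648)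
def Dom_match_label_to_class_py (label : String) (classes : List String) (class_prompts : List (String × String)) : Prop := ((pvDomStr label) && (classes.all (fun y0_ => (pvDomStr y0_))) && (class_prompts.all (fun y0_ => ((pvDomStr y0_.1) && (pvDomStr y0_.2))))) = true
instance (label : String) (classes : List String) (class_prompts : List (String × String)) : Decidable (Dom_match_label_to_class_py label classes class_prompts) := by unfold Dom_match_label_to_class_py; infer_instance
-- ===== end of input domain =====

-- B replaces A's three sequential scans of classes by a single pass keeping the
-- earliest class at the strictly lowest matching tier (alternative decomposition, same cost).


-- ===== PORT A =====
-- shared per-class predicates (each Python computes these same boolean tests literally)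
def pvDirect (ll cls : String) : Bool := ll == PySem.Str.lower cls

def pvPrompt (ll cls : String) (cp : List (String × String)) : Bool :=
  (((PySem.Str.split? ((PySem.Dict.mk cp).getD cls cls) ".").getD []).map
      (fun p => PySem.Str.lower (PySem.Str.strip p))).contains ll

def pvSubstr (ll cls : String) : Bool :=
  PySem.Str.isIn ll (PySem.Str.lower cls) || PySem.Str.isIn (PySem.Str.lower cls) ll

-- 'for i, cls_name in enumerate(classes): if pred(cls_name): return i'
def pvScan (pred : String → Bool) (i : Int) : List String → Option Int
  | [] => none
  | c :: cs => if pred c then some i else pvScan pred (i + 1) cs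

def match_label_to_class_py (label : String) (classes : List String) (class_prompts : List (String × String)) : Option Int :=
  let ll := PySem.Str.strip (PySem.Str.lower label)
  match pvScan (fun c => pvDirect ll c) 0 classes with
  | some i => some i
  | none =>
    match pvScan (fun c => pvPrompt ll c class_prompts) 0 classes with
    | some i => some i
    | none => pvScan (fun c => pvSubstr ll c) 0 classes

-- ===== PORT B =====
-- single pass: exact match returns outright; otherwise keep (best_tier, best_idx),
-- checking a tier only when the current best does not already beat it
def pvGo (ll : String) (cp : List (String × String)) :
    List String → Int → Nat → Option Int → Option Int
  | [], _, _, best => best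
  | c :: cs, i, bt, best =>
    if pvDirect ll c then some i
    else if 2 < bt && pvPrompt ll c cp then pvGo ll cp cs (i + 1) 2 (some i)
    else if 3 < bt && pvSubstr ll c then pvGo ll cp cs (i + 1) 3 (some i)
    else pvGo ll cp cs (i + 1) bt best

def match_label_to_class_py_alt (label : String) (classes : List String) (class_prompts : List (String × String)) : Option Int :=
  pvGo (PySem.Str.strip (PySem.Str.lower label)) class_prompts classes 0 4 none

-- ===== PRECONDITION & SPEC =====
def Spec_match_label_to_class_py (label : String) (classes : List String) (class_prompts : List (String × String)) (out : Option Int) : Prop := out = match_label_to_class_py_alt label classes class_prompts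
instance (label : String) (classes : List String) (class_prompts : List (String × String)) (out : Option Int) : Decidable (Spec_match_label_to_class_py label classes class_prompts out) := by unfold Spec_match_label_to_class_py; infer_instance

-- ===== CLAIM (what is proved, stated in full; the proofs are below) =====
def Claim_equal_match_label_to_class_py : Prop := ∀ (label : String) (classes : List String) (class_prompts : List (String × String)), Dom_match_label_to_class_py label classes class_prompts → Spec_match_label_to_class_py label classes class_prompts (match_label_to_class_py label classes class_prompts)

-- ===== LEMMAS AND PROOFS =====

-- With best_tier = 2 only an exact match can still fire: the run is the tier-1 scan with fallback j.
theorem pvGo_two (ll : String) (cp : List (String × String)) (cs : List String)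
    (i : Int) (j : Option Int) :
    pvGo ll cp cs i 2 j =
      (match pvScan (fun c => pvDirect ll c) i cs with
       | some k => some k
       | none => j) := by
  induction cs generalizing i j with
  | nil => rfl
  | cons c cs ih =>
    by_cases h1 : pvDirect ll c
    · simp [pvGo, pvScan, h1]
    · simp only [pvGo, pvScan, h1, Bool.false_eq_true, if_false,
        show ¬ (2 : Nat) < 2 by omega, decide_false, Bool.false_and]
      exact ih (i + 1) j

-- With best_tier = 3 the run is the tier-1 then tier-2 chain with fallback j.
theorem pvGo_three (ll : String) (cp : List (String × String)) (cs : List String)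
    (i : Int) (j : Option Int) :
    pvGo ll cp cs i 3 j =
      (match pvScan (fun c => pvDirect ll c) i cs with
       | some k => some k
       | none =>
         match pvScan (fun c => pvPrompt ll c cp) i cs with
         | some k => some k
         | none => j) := by
  induction cs generalizing i j with
  | nil => rfl
  | cons c cs ih =>
    by_cases h1 : pvDirect ll c
    · simp [pvGo, pvScan, h1]
    · by_cases h2 : pvPrompt ll c cp
      · simp [pvGo, pvScan, h1, h2, pvGo_two]
      · simp only [pvGo, pvScan, h1, h2, Bool.false_eq_true, if_false, Bool.and_false,
          show ¬ (3 : Nat) < 3 by omega, decide_false, Bool.false_and]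
        exact ih (i + 1) j

-- With best_tier = 4 (initial state) the run is A's full three-scan chain.
theorem pvGo_four (ll : String) (cp : List (String × String)) (cs : List String)
    (i : Int) :
    pvGo ll cp cs i 4 none =
      (match pvScan (fun c => pvDirect ll c) i cs with
       | some k => some k
       | none =>
         match pvScan (fun c => pvPrompt ll c cp) i cs with
         | some k => some k
         | none => pvScan (fun c => pvSubstr ll c) i cs) := by
  induction cs generalizing i with
  | nil => rfl
  | cons c cs ih =>
    by_cases h1 : pvDirect ll c
    · simp [pvGo, pvScan, h1]
    · by_cases h2 : pvPrompt ll c cp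
      · simp [pvGo, pvScan, h1, h2, pvGo_two]
      · by_cases h3 : pvSubstr ll c
        · simp [pvGo, pvScan, h1, h2, h3, pvGo_three]
        · simp only [pvGo, pvScan, h1, h2, h3, Bool.false_eq_true, if_false,
            Bool.and_false]
          exact ih (i + 1)

-- ===== VERDICT (by name: the statement is the Claim_ definition above) =====
theorem match_label_to_class_py_spec : Claim_equal_match_label_to_class_py := by
  intro label classes class_prompts _
  unfold Spec_match_label_to_class_py match_label_to_class_py match_label_to_class_py_alt
  rw [pvGo_four]
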